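-- pv_equiv track=rewrite | github.com/wisefood/wisefood-data-api | src/backend/elastic.py | parse_sort_string
-- ===== SOURCE A (Python) =====
-- def parse_sort_string(sort_str: str):
--     # Allow commas or spaces between fields
--     tokens = sort_str.replace(",", " ").split()
--     result = []
--
--     i = 0
--     while i < len(tokens):
--         field = tokens[i]
--         order = "asc"
--
--         # If next token is asc/desc, use it
--         if i + 1 < len(tokens) and tokens[i + 1].lower() in ("asc", "desc"):
--             order = tokens[i + 1].lower()
--             i += 2
--         else:
--             i += 1
--
--         result.append((field, order))
--
--     return result
-- ===== SOURCE B (Python) =====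
-- def parse_sort_string(sort_str: str):
--     result = []
--     pending = None
--     for tok in sort_str.replace(",", " ").split():
--         if pending is not None and tok.lower() in ("asc", "desc"):
--             result.append((pending, tok.lower()))
--             pending = None
--         else:
--             if pending is not None:
--                 result.append((pending, "asc"))
--             pending = tok
--     if pending is not None:
--         result.append((pending, "asc"))
--     return result
-- ===== Notes on version B (the rewrite author's own statement) =====
-- stated objective: alternative
-- what changed: Replaced the index-based while loop with one-token lookahead (consuming 1 or 2 tokens per step) by a forward single pass over the tokens with a pending-field accumulator that is flushed when an order keyword or the next field arrives.
import Mathlib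
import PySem

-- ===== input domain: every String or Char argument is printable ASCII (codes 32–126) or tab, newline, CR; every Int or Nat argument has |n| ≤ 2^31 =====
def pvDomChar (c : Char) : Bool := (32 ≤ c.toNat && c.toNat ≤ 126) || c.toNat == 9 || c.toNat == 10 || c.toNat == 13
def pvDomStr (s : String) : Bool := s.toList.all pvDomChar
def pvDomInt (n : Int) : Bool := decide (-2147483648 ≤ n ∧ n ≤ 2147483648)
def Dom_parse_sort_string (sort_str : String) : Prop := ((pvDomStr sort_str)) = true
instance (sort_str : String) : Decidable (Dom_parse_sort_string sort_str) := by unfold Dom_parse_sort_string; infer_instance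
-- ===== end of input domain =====

-- B replaces A's index-based one-token-lookahead while loop by a single forward pass with a
-- pending-field accumulator (same O(n) cost; objective: alternative decomposition).

-- ===== PORT A =====
-- A's while loop over the index i: each step consumes tokens[i] (and, if the next token
-- lowercased is "asc"/"desc", tokens[i+1] too). Ported as recursion on the remaining tokens.
def pvLoopA : List String → List (String × String)
  | [] => []
  | [field] => [(field, "asc")]
  | field :: nxt :: rest' =>
    if PySem.Str.lower nxt = "asc" ∨ PySem.Str.lower nxt = "desc" then
      (field, PySem.Str.lower nxt) :: pvLoopA rest'
    else
      (field, "asc") :: pvLoopA (nxt :: rest')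

def parse_sort_string (sort_str : String) : List (String × String) :=
  pvLoopA (PySem.Str.split₀ (PySem.Str.replace sort_str "," " "))

-- ===== PORT B =====
-- B's forward pass: 'pending' holds the last seen field not yet emitted.
def pvLoopB : Option String → List String → List (String × String)
  | pending, [] =>
    match pending with
    | some f => [(f, "asc")]
    | none => []
  | pending, tok :: rest =>
    match pending with
    | some f =>
      if PySem.Str.lower tok = "asc" ∨ PySem.Str.lower tok = "desc" then
        (f, PySem.Str.lower tok) :: pvLoopB none rest
      else
        (f, "asc") :: pvLoopB (some tok) rest
    | none => pvLoopB (some tok) rest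

def parse_sort_string_alt (sort_str : String) : List (String × String) :=
  pvLoopB none (PySem.Str.split₀ (PySem.Str.replace sort_str "," " "))

-- ===== PRECONDITION & SPEC =====
def Spec_parse_sort_string (sort_str : String) (out : List (String × String)) : Prop := out = parse_sort_string_alt sort_str
instance (sort_str : String) (out : List (String × String)) : Decidable (Spec_parse_sort_string sort_str out) := by unfold Spec_parse_sort_string; infer_instance

-- ===== CLAIM (what is proved, stated in full; the proofs are below) =====
def Claim_equal_parse_sort_string : Prop := ∀ (sort_str : String), Dom_parse_sort_string sort_str → Spec_parse_sort_string sort_str (parse_sort_string sort_str)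

-- ===== LEMMAS AND PROOFS =====
theorem pvLoopB_eq (toks : List String) : ∀ pending : Option String,
    pvLoopB pending toks = pvLoopA (pending.toList ++ toks) := by
  induction toks with
  | nil => intro pending; cases pending <;> rfl
  | cons t rest ih =>
    intro pending
    cases pending with
    | none => simpa using ih (some t)
    | some f =>
      by_cases h : PySem.Str.lower t = "asc" ∨ PySem.Str.lower t = "desc"
      · simpa [pvLoopB, pvLoopA, h] using ih none
      · simpa [pvLoopB, pvLoopA, h] using ih (some t)

-- ===== VERDICT (by name: the statement is the Claim_ definition above) =====
theorem parse_sort_string_spec : Claim_equal_parse_sort_string := by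
  intro s _
  unfold Spec_parse_sort_string parse_sort_string parse_sort_string_alt
  exact (pvLoopB_eq _ none).symm
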